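-- pv_equiv track=rewrite | github.com/pmeletis/metrics_design | panoptic_parts/panoptic_parts/utils/tmp_utils.py | find_filename_in_list
-- ===== SOURCE A (Python) =====
-- def find_filename_in_list(filename, filename_list, subject='', ext=None):
--   f_found = None
--   for fs in filename_list:
--     if ext is not None:
--       if filename in fs and fs.endswith(str(ext)):
--         f_found = fs
--     else:
--       if filename in fs:
--         f_found = fs
--
--   if f_found is None:
--     raise FileNotFoundError('There is no corresponding ' + str(subject) + ' prediction file for ' + filename)
--
--   return f_found
-- ===== SOURCE B (Python) =====
-- def find_filename_in_list(filename, filename_list, subject='', ext=None):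
--   for fs in reversed(filename_list):
--     if filename in fs and (ext is None or fs.endswith(str(ext))):
--       return fs
--   raise FileNotFoundError('There is no corresponding ' + str(subject) + ' prediction file for ' + filename)
-- ===== Notes on version B (the rewrite author's own statement) =====
-- stated objective: simpler
-- what changed: Scans the list in reverse and returns on the first match (one unified condition), instead of scanning forward while overwriting a last-match accumulator.
import Mathlib
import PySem

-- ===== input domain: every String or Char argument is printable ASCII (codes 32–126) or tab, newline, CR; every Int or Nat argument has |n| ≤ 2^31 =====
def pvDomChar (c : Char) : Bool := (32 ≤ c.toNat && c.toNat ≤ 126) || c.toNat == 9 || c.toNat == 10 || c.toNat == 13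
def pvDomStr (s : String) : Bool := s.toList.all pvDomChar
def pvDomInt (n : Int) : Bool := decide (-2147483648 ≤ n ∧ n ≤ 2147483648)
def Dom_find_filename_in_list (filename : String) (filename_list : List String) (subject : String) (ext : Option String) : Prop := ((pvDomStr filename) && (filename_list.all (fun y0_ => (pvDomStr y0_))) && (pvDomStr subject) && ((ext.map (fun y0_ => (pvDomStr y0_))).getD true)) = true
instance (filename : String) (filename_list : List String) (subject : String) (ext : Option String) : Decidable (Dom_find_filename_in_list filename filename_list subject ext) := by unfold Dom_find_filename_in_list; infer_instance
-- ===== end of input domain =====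

-- B scans the list in reverse and returns the first match (one unified condition), instead of A's forward scan with a last-match accumulator; objective: simpler.


-- ===== PORT A =====
-- A: forward loop keeping the last match in f_found; raises if none (excluded by Pre_).
def pvMatchA (filename fs : String) (ext : Option String) : Bool :=
  match ext with
  | some e => PySem.Str.isIn filename fs && PySem.Str.endswith fs e
  | none   => PySem.Str.isIn filename fs

def find_filename_in_list (filename : String) (filename_list : List String) (subject : String) (ext : Option String) : String :=
  let f_found : Option String :=
    filename_list.foldl (fun acc fs => if pvMatchA filename fs ext then some fs else acc) none
  f_found.getD ""

-- ===== PORT B =====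
-- B: reverse scan, return the first match (early exit); raises if none (excluded by Pre_).
def pvMatchB (filename fs : String) (ext : Option String) : Bool :=
  PySem.Str.isIn filename fs && (ext.isNone || PySem.Str.endswith fs (ext.getD ""))

def pvScanB (filename : String) (ext : Option String) : List String → Option String
  | [] => none
  | fs :: rest =>
      if pvMatchB filename fs ext then some fs
      else pvScanB filename ext rest

def find_filename_in_list_alt (filename : String) (filename_list : List String) (subject : String) (ext : Option String) : String :=
  (pvScanB filename ext filename_list.reverse).getD ""

-- ===== PRECONDITION & SPEC =====
-- Pre_ excludes exactly the inputs on which A raises FileNotFoundError (no entry matches); B raises there too.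
def Pre_find_filename_in_list (filename : String) (filename_list : List String) (subject : String) (ext : Option String) : Prop :=
  ∃ fs ∈ filename_list, PySem.Str.isIn filename fs = true ∧
    (∀ e, ext = some e → PySem.Str.endswith fs e = true)
instance (filename : String) (filename_list : List String) (subject : String) (ext : Option String) : Decidable (Pre_find_filename_in_list filename filename_list subject ext) := by unfold Pre_find_filename_in_list; infer_instance
def pvWitness_find_filename_in_list : String × List String × String × Option String :=
  ("a", ["xa.txt", "b"], "part", some ".txt")

def Spec_find_filename_in_list (filename : String) (filename_list : List String) (subject : String) (ext : Option String) (out : String) : Prop := out = find_filename_in_list_alt filename filename_list subject ext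
instance (filename : String) (filename_list : List String) (subject : String) (ext : Option String) (out : String) : Decidable (Spec_find_filename_in_list filename filename_list subject ext out) := by unfold Spec_find_filename_in_list; infer_instance

-- ===== CLAIM (what is proved, stated in full; the proofs are below) =====
def Claim_equal_find_filename_in_list : Prop := ∀ (filename : String) (filename_list : List String) (subject : String) (ext : Option String), Dom_find_filename_in_list filename filename_list subject ext → Pre_find_filename_in_list filename filename_list subject ext → Spec_find_filename_in_list filename filename_list subject ext (find_filename_in_list filename filename_list subject ext)

-- ===== LEMMAS AND PROOFS =====

-- ===== VERDICT (by name: the statement is the Claim_ definition above) =====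
-- The two match conditions coincide.
lemma pvMatch_eq (filename fs : String) (ext : Option String) :
    pvMatchB filename fs ext = pvMatchA filename fs ext := by
  cases ext <;> simp [pvMatchA, pvMatchB]

-- first match of a concatenation
lemma pvScanB_append (filename : String) (ext : Option String) (xs ys : List String) :
    pvScanB filename ext (xs ++ ys) = (pvScanB filename ext xs).orElse (fun _ => pvScanB filename ext ys) := by
  induction xs with
  | nil => simp [pvScanB]
  | cons fs rest ih => by_cases h : pvMatchB filename fs ext = true <;> simp [pvScanB, h, ih]

-- A's last-match fold equals B's first match on the reversed list, modulo the accumulator.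
lemma fold_eq_scan (filename : String) (ext : Option String) (l : List String) (acc : Option String) :
    l.foldl (fun acc fs => if pvMatchA filename fs ext then some fs else acc) acc
      = (pvScanB filename ext l.reverse).orElse (fun _ => acc) := by
  induction l generalizing acc with
  | nil => simp [pvScanB]
  | cons fs rest ih =>
      simp only [List.foldl_cons, List.reverse_cons, pvScanB_append, ih]
      have hm := pvMatch_eq filename fs ext
      cases hsc : pvScanB filename ext rest.reverse <;>
        by_cases h : pvMatchB filename fs ext = true <;>
          simp_all [pvScanB, Option.orElse]

theorem find_filename_in_list_spec : Claim_equal_find_filename_in_list := by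
  intro filename filename_list subject ext _ hpre
  unfold Spec_find_filename_in_list find_filename_in_list find_filename_in_list_alt
  simp only [fold_eq_scan]
  cases hsc : pvScanB filename ext filename_list.reverse with
  | some v => simp [Option.orElse]
  | none =>
      -- impossible: Pre_ gives a matching element, so the scan finds one
      exfalso
      obtain ⟨fs, hmem, hin, hext⟩ := hpre
      have hmem' : fs ∈ filename_list.reverse := by simpa using hmem
      have hcond : pvMatchB filename fs ext = true := by
        simp only [pvMatchB]
        cases ext with
        | none => simp_all
        | some e => have he := hext e rfl; simp_all
      clear hmem
      generalize filename_list.reverse = L at hsc hmem'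
      induction L with
      | nil => simp at hmem'
      | cons a rest ih =>
          cases hmem' with
          | head => simp [pvScanB, hcond] at hsc
          | tail _ hmem' =>
              by_cases h : pvMatchB filename a ext = true
              · simp [pvScanB, h] at hsc
              · exact ih (by simpa [pvScanB, h] using hsc) hmem'
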